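-- pv_equiv track=rewrite | github.com/AlifSrSE/ProblemSolves | 1438C-engineerArtem.py | solve
-- ===== SOURCE A (Python) =====
-- from collections import defaultdict
--
-- def solve(a):
--     n = len(a)
--     m = len(a[0])
--     value_to_points = defaultdict(list)
--     for r in range(n):
--         for c in range(m):
--             value_to_points[a[r][c]].append((r, c))
--
--     result = [[0] * m for _ in range(n)]
--     count = 0
--     for val in sorted(value_to_points.keys()):
--         points = value_to_points[val]
--         for r, c in points:
--             result[r][c] = val + (0 if (r + c) % 2 == count % 2 else 1)
--         count += 1
--
--     return "\n".join(" ".join(map(str, row)) for row in result)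
-- ===== SOURCE B (Python) =====
-- def solve(a):
--     m = len(a[0])
--     vals = set()
--     for row in a:
--         vals.update(row[:m])
--     offset = {v: sum(u < v for u in vals) for v in vals}
--     return "\n".join(
--         " ".join(str(row[c] + (r + c + offset[row[c]]) % 2) for c in range(m))
--         for r, row in enumerate(a))
-- ===== Notes on version B (the rewrite author's own statement) =====
-- stated objective: alternative
-- what changed: B eliminates A's sorting and value->points grouping entirely: it builds the set of cell values once, computes each value's rank by COUNTING the distinct values smaller than it (order statistics by comparison counting, no sort), and emits every output cell directly as val+(r+c+rank)%2 in one pass over the grid.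
import Mathlib
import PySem

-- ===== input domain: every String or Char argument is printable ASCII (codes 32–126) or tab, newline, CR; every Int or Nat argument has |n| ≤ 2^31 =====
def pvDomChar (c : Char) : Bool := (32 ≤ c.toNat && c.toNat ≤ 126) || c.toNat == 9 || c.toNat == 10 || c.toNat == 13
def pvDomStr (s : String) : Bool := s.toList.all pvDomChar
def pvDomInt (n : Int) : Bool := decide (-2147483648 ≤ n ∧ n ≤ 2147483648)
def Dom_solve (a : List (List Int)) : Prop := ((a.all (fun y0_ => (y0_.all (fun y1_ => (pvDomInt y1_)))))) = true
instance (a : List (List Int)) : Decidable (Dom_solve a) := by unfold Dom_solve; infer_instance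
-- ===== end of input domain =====

-- B replaces A's sort-and-group algorithm by rank-by-counting (no sort, no grouping): each value's
-- rank is the number of distinct smaller values, and each output cell is emitted directly as
-- val + (r+c+rank)%2; equivalence is about the return value.

-- ===== PORT A =====
-- literal transliteration of Source A's solve (pyGetD/pySetD are the total forms of a[i] / a[i]=v, exact under Pre_solve)
def solve (a : List (List Int)) : String :=
  let n : Int := a.length
  let m : Int := (PySem.List.pyGetD a 0 []).length
  let d : PySem.Dict Int (List (Int × Int)) :=
    (PySem.List.pyRange 0 n 1).foldl (fun d r =>
      (PySem.List.pyRange 0 m 1).foldl (fun d c =>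
        d.modify (PySem.List.pyGetD (PySem.List.pyGetD a r []) c 0) [] (· ++ [(r, c)])) d)
      PySem.Dict.empty
  let result0 : List (List Int) :=
    (PySem.List.pyRange 0 n 1).map (fun _ => PySem.List.pyRepeat [(0 : Int)] m)
  let fin : List (List Int) × Int :=
    (PySem.List.sorted d.keys (fun v => v) false).foldl
      (fun (st : List (List Int) × Int) val =>
        let points := d.getD val []
        let res := points.foldl (fun res p =>
          PySem.List.pySetD res p.1
            (PySem.List.pySetD (PySem.List.pyGetD res p.1 []) p.2
              (val + (if PySem.Int.mod (p.1 + p.2) 2 == PySem.Int.mod st.2 2 then 0 else 1)))) st.1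
        (res, st.2 + 1))
      (result0, 0)
  PySem.Str.join "\n" (fin.1.map (fun row => PySem.Str.join " " (row.map PySem.Int.toStr)))

-- ===== PORT B =====
-- literal transliteration of Source B's solve: set of values, rank = sum(u < v for u in vals)
-- per distinct value (no sorting), then one direct pass emitting val + (r+c+rank)%2.
-- (offset[row[c]] never misses under Pre_solve, so Dict.getD is its exact total form.)
def solve_alt (a : List (List Int)) : String :=
  let m : Int := (PySem.List.pyGetD a 0 []).length
  let vals : PySem.Set Int :=
    a.foldl (fun s row => PySem.Set.update s (PySem.List.slice row none (some m))) PySem.Set.empty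
  let offset : PySem.Dict Int Int :=
    vals.foldl (fun d v =>
      d.insert v ((vals.map (fun u => if u < v then (1 : Int) else 0)).sum)) PySem.Dict.empty
  PySem.Str.join "\n"
    ((PySem.List.enumerate a 0).map (fun rp =>
      PySem.Str.join " "
        ((PySem.List.pyRange 0 m 1).map (fun c =>
          PySem.Int.toStr (PySem.List.pyGetD rp.2 c 0 +
            PySem.Int.mod (rp.1 + c + offset.getD (PySem.List.pyGetD rp.2 c 0) 0) 2)))))

-- ===== PRECONDITION & SPEC =====
-- Pre_ excludes exactly the inputs where A raises IndexError: the empty grid (len(a[0]))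
-- and grids whose first row is longer than some later row (a[r][c] for c < len(a[0])).
def Pre_solve (a : List (List Int)) : Prop :=
  a ≠ [] ∧ ∀ row ∈ a, (PySem.List.pyGetD a 0 []).length ≤ row.length
instance (a : List (List Int)) : Decidable (Pre_solve a) := by unfold Pre_solve; infer_instance
def pvWitness_solve : List (List Int) := [[1, 2], [2, 4]]

def Spec_solve (a : List (List Int)) (out : String) : Prop := out = solve_alt a
instance (a : List (List Int)) (out : String) : Decidable (Spec_solve a out) := by unfold Spec_solve; infer_instance

-- ===== CLAIM (what is proved, stated in full; the proofs are below) =====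
def Claim_equal_solve : Prop := ∀ (a : List (List Int)), Dom_solve a → Pre_solve a → Spec_solve a (solve a)

-- ===== LEMMAS AND PROOFS =====
-- proof-side helper definitions (not used by the ports or the claim)
def pvCell (g : List (List Int)) (r c : Nat) : Int := (g.getD r []).getD c 0
def pvM (a : List (List Int)) : Nat := (PySem.List.pyGetD a 0 []).length
def pvVal (a : List (List Int)) (p : Int × Int) : Int :=
  PySem.List.pyGetD (PySem.List.pyGetD a p.1 []) p.2 0
def pvPts (a : List (List Int)) : List (Int × Int) :=
  (PySem.List.pyRange 0 a.length 1).flatMap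
    (fun r => (PySem.List.pyRange 0 (pvM a) 1).map (fun c => (r, c)))
def pvPoints (a : List (List Int)) (v : Int) : List (Int × Int) :=
  (pvPts a).filter (fun p => pvVal a p == v)
def pvWrite (g : List (List Int)) (p : Int × Int) (x : Int) : List (List Int) :=
  PySem.List.pySetD g p.1 (PySem.List.pySetD (PySem.List.pyGetD g p.1 []) p.2 x)
def pvStep (a : List (List Int)) (st : List (List Int) × Int) (v : Int) : List (List Int) × Int :=
  ((pvPoints a v).foldl (fun res p =>
      pvWrite res p (v + (if PySem.Int.mod (p.1 + p.2) 2 == PySem.Int.mod st.2 2 then 0 else 1))) st.1,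
   st.2 + 1)
def pvSet (a : List (List Int)) : PySem.Set Int :=
  PySem.Set.ofList (a.flatMap (fun row => row.take (pvM a)))
def pvVals (a : List (List Int)) : List Int :=
  PySem.List.sorted (pvSet a) (fun v => v) false


-- generic getD/set fact used by the cell-update lemmas
theorem pv_getD_set {α : Type} (l : List α) (i j : Nat) (a d : α) :
    (l.set i a).getD j d = if j = i ∧ i < l.length then a else l.getD j d := by
  rw [List.getD_eq_getElem?_getD, List.getD_eq_getElem?_getD, List.getElem?_set]
  split_ifs with h1 h2 h3 <;> simp_all

theorem pv_getElem_eq_getD (l : List (List Int)) (r : Nat) (h : r < l.length) :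
    l[r] = l.getD r [] := by
  rw [List.getD_eq_getElem?_getD, List.getElem?_eq_getElem h]; rfl

theorem pv_cell_eq_getElem (g : List (List Int)) (r c : Nat) (hr : r < g.length)
    (hc : c < g[r].length) : g[r][c] = pvCell g r c := by
  rw [pvCell, ← pv_getElem_eq_getD _ _ hr, List.getD_eq_getElem?_getD,
    List.getElem?_eq_getElem hc]; rfl

theorem pvWrite_length (g : List (List Int)) (p : Int × Int) (x : Int)
    (h1 : 0 ≤ p.1) : (pvWrite g p x).length = g.length := by
  simp [pvWrite, PySem.List.pySetD_of_nonneg _ _ h1]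

theorem pvWrite_rowlen (g : List (List Int)) (p : Int × Int) (x : Int)
    (h1 : 0 ≤ p.1) (h2 : 0 ≤ p.2) (r : Nat) :
    ((pvWrite g p x).getD r []).length = (g.getD r []).length := by
  simp only [pvWrite, PySem.List.pySetD_of_nonneg _ _ h1, PySem.List.pySetD_of_nonneg _ _ h2,
    PySem.List.pyGetD_of_nonneg _ _ h1]
  rw [pv_getD_set]
  split_ifs with h
  · rw [h.1]; simp
  · rfl

theorem pvCell_write_ne (g : List (List Int)) (r c : Nat) (x : Int) (r' c' : Nat)
    (h : ¬ (r' = r ∧ c' = c)) :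
    pvCell (pvWrite g ((r : Int), (c : Int)) x) r' c' = pvCell g r' c' := by
  simp only [pvCell, pvWrite, PySem.List.pySetD_of_nonneg _ _ (Int.natCast_nonneg r),
    PySem.List.pySetD_of_nonneg _ _ (Int.natCast_nonneg c),
    PySem.List.pyGetD_natCast, Int.toNat_natCast]
  rw [pv_getD_set]
  split_ifs with h1
  · rw [h1.1, pv_getD_set]
    split_ifs with h2
    · exact absurd ⟨h1.1, h2.1⟩ h
    · rfl
  · rfl

theorem pvCell_write_self (g : List (List Int)) (r c : Nat) (x : Int)
    (hr : r < g.length) (hc : c < (g.getD r []).length) :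
    pvCell (pvWrite g ((r : Int), (c : Int)) x) r c = x := by
  simp only [pvCell, pvWrite, PySem.List.pySetD_of_nonneg _ _ (Int.natCast_nonneg r),
    PySem.List.pySetD_of_nonneg _ _ (Int.natCast_nonneg c),
    PySem.List.pyGetD_natCast, Int.toNat_natCast]
  rw [pv_getD_set, if_pos ⟨rfl, hr⟩, pv_getD_set, if_pos ⟨rfl, hc⟩]

-- the inner points loop of A: each p ∈ ps receives the value w p
theorem pv_inner_shape (w : Int × Int → Int) (ps : List (Int × Int)) (g : List (List Int))
    (hb : ∀ p ∈ ps, 0 ≤ p.1 ∧ 0 ≤ p.2) :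
    (ps.foldl (fun g p => pvWrite g p (w p)) g).length = g.length ∧
    (∀ r : Nat, ((ps.foldl (fun g p => pvWrite g p (w p)) g).getD r []).length = (g.getD r []).length) := by
  induction ps generalizing g with
  | nil => exact ⟨rfl, fun _ => rfl⟩
  | cons p t ih =>
    have hp := hb p (List.mem_cons_self)
    have ht := fun q hq => hb q (List.mem_cons_of_mem _ hq)
    simp only [List.foldl_cons]
    obtain ⟨l1, l2⟩ := ih (pvWrite g p (w p)) ht
    exact ⟨l1.trans (pvWrite_length g p _ hp.1),
      fun r => (l2 r).trans (pvWrite_rowlen g p _ hp.1 hp.2 r)⟩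

theorem pv_inner_ne (w : Int × Int → Int) (ps : List (Int × Int)) (g : List (List Int))
    (hb : ∀ p ∈ ps, 0 ≤ p.1 ∧ 0 ≤ p.2) (r c : Nat)
    (hmem : ((r : Int), (c : Int)) ∉ ps) :
    pvCell (ps.foldl (fun g p => pvWrite g p (w p)) g) r c = pvCell g r c := by
  induction ps generalizing g with
  | nil => rfl
  | cons p t ih =>
    have hp := hb p (List.mem_cons_self)
    have ht := fun q hq => hb q (List.mem_cons_of_mem _ hq)
    simp only [List.foldl_cons]
    rw [ih (pvWrite g p (w p)) ht (fun h => hmem (List.mem_cons_of_mem _ h))]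
    have hpne : p ≠ ((r : Int), (c : Int)) := fun h => hmem (h ▸ List.mem_cons_self)
    obtain ⟨p1, p2⟩ := p
    have : p1 = (p1.toNat : Int) := (Int.toNat_of_nonneg hp.1).symm
    have h2 : p2 = (p2.toNat : Int) := (Int.toNat_of_nonneg hp.2).symm
    rw [this, h2] at hpne ⊢
    apply pvCell_write_ne
    rintro ⟨rfl, rfl⟩
    exact hpne rfl

theorem pv_inner_mem (w : Int × Int → Int) (ps : List (Int × Int)) (g : List (List Int))
    (hb : ∀ p ∈ ps, 0 ≤ p.1 ∧ 0 ≤ p.2) (r c : Nat)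
    (hmem : ((r : Int), (c : Int)) ∈ ps) (hr : r < g.length) (hc : c < (g.getD r []).length) :
    pvCell (ps.foldl (fun g p => pvWrite g p (w p)) g) r c = w ((r : Int), (c : Int)) := by
  induction ps generalizing g with
  | nil => simp at hmem
  | cons p t ih =>
    have hp := hb p (List.mem_cons_self)
    have ht := fun q hq => hb q (List.mem_cons_of_mem _ hq)
    simp only [List.foldl_cons]
    by_cases hmem' : ((r : Int), (c : Int)) ∈ t
    · exact ih (pvWrite g p (w p)) ht hmem'
        (by rw [pvWrite_length g p _ hp.1]; exact hr)
        (by rw [pvWrite_rowlen g p _ hp.1 hp.2]; exact hc)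
    · have hph : p = ((r : Int), (c : Int)) := by
        rcases List.mem_cons.mp hmem with h | h
        · exact h.symm
        · exact absurd h hmem'
      subst hph
      rw [pv_inner_ne w t _ ht r c hmem', pvCell_write_self g r c _ hr hc]

theorem pv_mem_pts (a : List (List Int)) (p : Int × Int) :
    p ∈ pvPts a ↔ 0 ≤ p.1 ∧ p.1 < a.length ∧ 0 ≤ p.2 ∧ p.2 < pvM a := by
  obtain ⟨p1, p2⟩ := p
  simp only [pvPts, List.mem_flatMap, List.mem_map, PySem.List.mem_pyRange_one, Prod.mk.injEq]
  constructor
  · rintro ⟨r, ⟨h1, h2⟩, c, ⟨h3, h4⟩, rfl, rfl⟩; exact ⟨h1, h2, h3, h4⟩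
  · rintro ⟨h1, h2, h3, h4⟩; exact ⟨p1, ⟨h1, h2⟩, p2, ⟨h3, h4⟩, rfl, rfl⟩

theorem pv_mem_points (a : List (List Int)) (v : Int) (r c : Nat) :
    ((r : Int), (c : Int)) ∈ pvPoints a v ↔
      r < a.length ∧ c < pvM a ∧ pvVal a ((r : Int), (c : Int)) = v := by
  simp only [pvPoints, List.mem_filter, pv_mem_pts, beq_iff_eq]
  constructor
  · rintro ⟨⟨_, h2, _, h4⟩, h5⟩; exact ⟨by exact_mod_cast h2, by exact_mod_cast h4, h5⟩
  · rintro ⟨h1, h2, h3⟩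
    exact ⟨⟨Int.natCast_nonneg r, by exact_mod_cast h1, Int.natCast_nonneg c, by exact_mod_cast h2⟩, h3⟩

theorem pv_points_nonneg (a : List (List Int)) (v : Int) :
    ∀ p ∈ pvPoints a v, 0 ≤ p.1 ∧ 0 ≤ p.2 := by
  intro p hp
  have := (pv_mem_pts a p).mp (List.mem_of_mem_filter hp)
  exact ⟨this.1, this.2.2.1⟩

-- the outer loop of A over the sorted distinct values, with running count k
theorem pv_outer (a : List (List Int)) (vs : List Int) (k : Int) (g : List (List Int))
    (hnd : vs.Nodup) (hlen : g.length = a.length)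
    (hrow : ∀ r : Nat, r < a.length → (g.getD r []).length = pvM a) :
    (vs.foldl (pvStep a) (g, k)).1.length = a.length ∧
    (∀ r : Nat, r < a.length → ((vs.foldl (pvStep a) (g, k)).1.getD r []).length = pvM a) ∧
    ∀ r c : Nat, r < a.length → c < pvM a →
      pvCell (vs.foldl (pvStep a) (g, k)).1 r c =
        if pvVal a ((r:Int),(c:Int)) ∈ vs
        then pvVal a ((r:Int),(c:Int)) +
          (if PySem.Int.mod ((r:Int)+(c:Int)) 2 ==
              PySem.Int.mod (k + (vs.idxOf (pvVal a ((r:Int),(c:Int))) : Int)) 2 then 0 else 1)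
        else pvCell g r c := by
  induction vs generalizing k g with
  | nil => exact ⟨hlen, hrow, fun r c h1 h2 => by simp⟩
  | cons v t ih =>
    have hb := pv_points_nonneg a v
    simp only [List.foldl_cons]
    have hg1 := pv_inner_shape
      (fun p => v + (if PySem.Int.mod (p.1 + p.2) 2 == PySem.Int.mod k 2 then 0 else 1))
      (pvPoints a v) g hb
    set g1 := (pvPoints a v).foldl (fun res p =>
      pvWrite res p (v + (if PySem.Int.mod (p.1 + p.2) 2 == PySem.Int.mod k 2 then 0 else 1))) g with hg1def
    have hstep : pvStep a (g, k) v = (g1, k + 1) := rfl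
    rw [hstep]
    have hlen1 : g1.length = a.length := hg1.1.trans hlen
    have hrow1 : ∀ r : Nat, r < a.length → (g1.getD r []).length = pvM a :=
      fun r hr => (hg1.2 r).trans (hrow r hr)
    obtain ⟨jl, jr, jc⟩ := ih (List.Nodup.of_cons hnd) hlen1 (k := k + 1) (g := g1) hrow1
    refine ⟨jl, jr, fun r c h1 h2 => ?_⟩
    rw [jc r c h1 h2]
    by_cases hv : pvVal a ((r:Int),(c:Int)) = v
    · have hnt : pvVal a ((r:Int),(c:Int)) ∉ t := by rw [hv]; exact (List.nodup_cons.mp hnd).1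
      rw [if_neg hnt, if_pos (by rw [hv]; exact List.mem_cons_self)]
      have hcell : pvCell g1 r c = v + (if PySem.Int.mod ((r:Int)+(c:Int)) 2 == PySem.Int.mod k 2 then 0 else 1) :=
        pv_inner_mem _ _ g hb r c ((pv_mem_points a v r c).mpr ⟨h1, h2, hv⟩)
          (by rw [hlen]; exact h1) (by rw [hrow r h1]; exact h2)
      rw [hcell, hv, List.idxOf_cons_self]
      norm_num
    · by_cases hmem : pvVal a ((r:Int),(c:Int)) ∈ t
      · rw [if_pos hmem, if_pos (List.mem_cons_of_mem _ hmem),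
          List.idxOf_cons_ne t (fun h => hv h.symm)]
        have : (k + 1 + (t.idxOf (pvVal a ((r:Int),(c:Int))) : Int)) =
            k + ((t.idxOf (pvVal a ((r:Int),(c:Int))) + 1 : Nat) : Int) := by push_cast; ring
        rw [this]
      · rw [if_neg hmem, if_neg (by simp [hv, hmem])]
        exact pv_inner_ne _ _ g hb r c
          (fun h => hv (((pv_mem_points a v r c).mp h).2.2))

-- the grouping dict of A, as a fold over the flattened point list
theorem pv_dict_eq (a : List (List Int)) :
    (PySem.List.pyRange 0 (a.length : Int) 1).foldl (fun d r =>
        (PySem.List.pyRange 0 ((PySem.List.pyGetD a 0 []).length : Int) 1).foldl (fun d c =>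
          d.modify (PySem.List.pyGetD (PySem.List.pyGetD a r []) c 0) [] (· ++ [(r, c)])) d)
      PySem.Dict.empty =
    (pvPts a).foldl (fun d p => d.modify (pvVal a p) [] (· ++ [p])) PySem.Dict.empty := by
  rw [pvPts, List.foldl_flatMap]
  apply PySem.List.foldl_congr_mem
  intro d r _
  rw [List.foldl_map]
  rfl

theorem pv_getD_eq (a : List (List Int)) (v : Int) :
    ((pvPts a).foldl (fun d p => d.modify (pvVal a p) [] (· ++ [p])) PySem.Dict.empty).getD v [] =
    pvPoints a v := by
  have : (pvPts a).foldl (fun d p => d.modify (pvVal a p) [] (· ++ [p])) PySem.Dict.empty =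
      ((pvPts a).map (fun p => (pvVal a p, p))).foldl
        (fun d q => d.modify q.1 [] (· ++ [q.2])) PySem.Dict.empty := by
    rw [List.foldl_map]
  rw [this, PySem.Dict.getD_foldl_modify_append, PySem.Dict.getD_empty, List.filter_map]
  simp [pvPoints, Function.comp_def]

theorem pv_keys_eq (a : List (List Int)) :
    ((pvPts a).foldl (fun d p => d.modify (pvVal a p) [] (· ++ [p])) PySem.Dict.empty).keys =
    PySem.Set.ofList ((pvPts a).map (pvVal a)) := by
  rw [PySem.Dict.keys_foldl_modify_key (pvPts a) (pvVal a) [] (fun d p l => l ++ [p]),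
    PySem.Dict.keys_empty, PySem.Set.update_nil_left]

-- reading one row with Python indices, under the Pre_ bound
theorem pv_row_take (row : List Int) (m : Nat) (hm : m ≤ row.length) :
    (PySem.List.pyRange 0 (m : Int) 1).map (fun c => PySem.List.pyGetD row c 0) = row.take m := by
  have hlen : (row.take m).length = m := by simp [hm]
  have := PySem.List.map_pyGetD_pyRange_zero (row.take m) 0
  rw [PySem.List.len_eq, hlen] at this
  rw [← this]
  apply List.map_congr_left
  intro c hc
  obtain ⟨h0, h1⟩ := PySem.List.mem_pyRange_one.mp hc
  rw [PySem.List.pyGetD_of_nonneg _ _ h0, PySem.List.pyGetD_of_nonneg _ _ h0]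
  rw [List.getD_eq_getElem?_getD, List.getD_eq_getElem?_getD, List.getElem?_take]
  simp only [if_pos (by omega : c.toNat < m)]

theorem pv_map_val (a : List (List Int)) (hp : ∀ row ∈ a, pvM a ≤ row.length) :
    (pvPts a).map (pvVal a) = a.flatMap (fun row => row.take (pvM a)) := by
  rw [pvPts, List.map_flatMap]
  have h1 : ∀ r ∈ PySem.List.pyRange 0 (a.length : Int) 1,
      ((PySem.List.pyRange 0 ((pvM a : Nat) : Int) 1).map (fun c => (r, c))).map (pvVal a) =
      (fun row => row.take (pvM a)) (PySem.List.pyGetD a r []) := by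
    intro r hr
    obtain ⟨h0, h1⟩ := PySem.List.mem_pyRange_one.mp hr
    rw [List.map_map]
    have : pvVal a ∘ (fun c => (r, c)) = fun c => PySem.List.pyGetD (PySem.List.pyGetD a r []) c 0 := rfl
    rw [this, pv_row_take _ _ (hp _ (by
      rw [PySem.List.pyGetD_of_nonneg _ _ h0, List.getD_eq_getElem?_getD,
        List.getElem?_eq_getElem (by omega)]
      exact List.getElem_mem _))]
  rw [List.flatMap_congr h1]
  have h2 := PySem.List.map_pyGetD_pyRange_zero a []
  rw [PySem.List.len_eq] at h2
  rw [← List.flatMap_map (fun r => PySem.List.pyGetD a r []) (fun row => row.take (pvM a)), h2]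

-- B's value set: the row-by-row set.update fold IS the set of the flattened (truncated) grid
theorem pv_set_eq (a : List (List Int)) (m : Nat) :
    a.foldl (fun s row => PySem.Set.update s (PySem.List.slice row none (some (m : Int))))
      PySem.Set.empty =
    PySem.Set.ofList (a.flatMap (fun row => row.take m)) := by
  simp only [PySem.List.slice_to_natCast]
  rw [PySem.Set.ofList_eq_foldl, List.foldl_flatMap]
  rfl

-- B's offset dict: a fold of inserts keyed by a duplicate-free list, looked up at a member
theorem pv_insert_fold_not_mem (l : List Int) (f : Int → Int) (d : PySem.Dict Int Int) (v : Int)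
    (hv : v ∉ l) :
    (l.foldl (fun d x => d.insert x (f x)) d).getD v 0 = d.getD v 0 := by
  induction l generalizing d with
  | nil => rfl
  | cons x t ih =>
    rw [List.foldl_cons, ih _ (fun h => hv (List.mem_cons_of_mem _ h)),
      PySem.Dict.getD_insert_of_ne _ _ _ (fun h : v = x => hv (h ▸ List.mem_cons_self))]

theorem pv_insert_fold_mem (l : List Int) (f : Int → Int) (d : PySem.Dict Int Int) (v : Int)
    (hnd : l.Nodup) (hv : v ∈ l) :
    (l.foldl (fun d x => d.insert x (f x)) d).getD v 0 = f v := by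
  induction l generalizing d with
  | nil => simp at hv
  | cons x t ih =>
    rw [List.foldl_cons]
    by_cases hx : v = x
    · subst hx
      rw [pv_insert_fold_not_mem t f _ v (List.nodup_cons.mp hnd).1, PySem.Dict.getD_insert_self]
    · exact ih _ (List.Nodup.of_cons hnd) (List.mem_cons.mp hv |>.resolve_left hx)

-- on a strictly increasing list, the index of a member is the number of smaller elements
theorem pv_idxOf_countP (l : List Int) (hs : l.Pairwise (· < ·)) (v : Int) (hv : v ∈ l) :
    l.idxOf v = l.countP (fun u => decide (u < v)) := by
  induction l with
  | nil => simp at hv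
  | cons x t ih =>
    rcases List.pairwise_cons.mp hs with ⟨hx, ht⟩
    by_cases hxv : v = x
    · subst hxv
      rw [List.idxOf_cons_self, List.countP_cons]
      have h1 : t.countP (fun u => decide (u < v)) = 0 :=
        List.countP_eq_zero.mpr (fun u hu => by simp [not_lt.mpr (le_of_lt (hx u hu))])
      simp [h1]
    · have hvt : v ∈ t := List.mem_cons.mp hv |>.resolve_left hxv
      rw [List.idxOf_cons_ne t (fun h => hxv h.symm), List.countP_cons,
        ih ht hvt]
      have : x < v := hx v hvt
      simp [this]

-- the parity branch of A is the arithmetic offset of B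
theorem pv_bump (s k : Int) :
    (if PySem.Int.mod s 2 == PySem.Int.mod k 2 then (0 : Int) else 1) =
      PySem.Int.mod (s + k) 2 := by
  rw [PySem.Int.mod_eq_emod_of_pos (by norm_num), PySem.Int.mod_eq_emod_of_pos (by norm_num),
    PySem.Int.mod_eq_emod_of_pos (by norm_num)]
  split_ifs with h
  · rw [beq_iff_eq] at h; omega
  · rw [beq_iff_eq] at h; omega

theorem pv_vals_nodup (a : List (List Int)) : (pvVals a).Nodup :=
  ((PySem.List.sorted_perm _ _ _).nodup_iff).mpr (PySem.Set.nodup_ofList _)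

theorem pv_mem_vals (a : List (List Int)) (r c : Nat) (hr : r < a.length) (hc : c < pvM a)
    (hp : ∀ row ∈ a, pvM a ≤ row.length) :
    pvVal a ((r : Int), (c : Int)) ∈ pvVals a := by
  have hrow : PySem.List.pyGetD a (r : Int) [] = a[r] := by
    rw [PySem.List.pyGetD_natCast, List.getD_eq_getElem?_getD, List.getElem?_eq_getElem hr]; rfl
  have hcl : c < a[r].length := lt_of_lt_of_le hc (hp _ (List.getElem_mem hr))
  have hval : pvVal a ((r : Int), (c : Int)) = a[r][c] := by
    rw [pvVal, hrow, PySem.List.pyGetD_natCast, List.getD_eq_getElem?_getD,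
      List.getElem?_eq_getElem hcl]; rfl
  rw [pvVals, PySem.List.mem_sorted, pvSet, PySem.Set.mem_ofList, List.mem_flatMap]
  refine ⟨a[r], List.getElem_mem hr, ?_⟩
  rw [hval]
  have : a[r][c] = (a[r].take (pvM a))[c]'(by simp [hc, hcl]) := by
    simp [List.getElem_take]
  rw [this]
  exact List.getElem_mem _

theorem pv_g0_len (a : List (List Int)) :
    ((PySem.List.pyRange 0 (a.length : Int) 1).map
      (fun _ => PySem.List.pyRepeat [(0 : Int)] ((pvM a : Nat) : Int))).length = a.length := by
  simp [PySem.List.length_pyRange_one]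

theorem pv_g0_row (a : List (List Int)) (r : Nat) (hr : r < a.length) :
    (((PySem.List.pyRange 0 (a.length : Int) 1).map
      (fun _ => PySem.List.pyRepeat [(0 : Int)] ((pvM a : Nat) : Int))).getD r []).length = pvM a := by
  rw [List.getD_eq_getElem?_getD, List.getElem?_eq_getElem (by simp [PySem.List.length_pyRange_one]; omega)]
  simp [PySem.List.pyRepeat_singleton]

-- B's per-cell offset is A's parity branch: rank by counting = index in the sorted distinct list
theorem pv_offset_eq_idx (a : List (List Int)) (v : Int) (hv : v ∈ pvVals a) :
    ((pvSet a).map (fun u => if u < v then (1 : Int) else 0)).sum =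
      ((pvVals a).idxOf v : Int) := by
  have hpl : (pvVals a).Pairwise (fun x y => x < y) := by
    unfold pvVals pvSet
    exact PySem.List.sorted_ofList_pairwise_lt (a.flatMap (fun row => row.take (pvM a)))
  have h1 : ((pvSet a).map (fun u => if u < v then (1 : Int) else 0)).sum =
      ((pvSet a).countP (fun u => decide (u < v)) : Int) := by
    simpa using PySem.List.sum_map_ite_one_zero (fun u => decide (u < v)) (pvSet a)
  have h2 : (pvVals a).countP (fun u => decide (u < v)) =
      (pvSet a).countP (fun u => decide (u < v)) :=
    (PySem.List.sorted_perm (pvSet a) (fun x => x) false).countP_eq _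
  rw [h1, pv_idxOf_countP (pvVals a) hpl v hv]
  exact_mod_cast h2.symm

theorem pv_main (a : List (List Int)) (_hne : a ≠ [])
    (hp : ∀ row ∈ a, (PySem.List.pyGetD a 0 []).length ≤ row.length) :
    solve a = solve_alt a := by
  have hpm : ∀ row ∈ a, pvM a ≤ row.length := hp
  simp only [solve, solve_alt]
  rw [pv_dict_eq, pv_keys_eq, pv_map_val a hpm]
  have hstep : (fun (st : List (List Int) × Int) val =>
      ((((pvPts a).foldl (fun d p => d.modify (pvVal a p) [] (· ++ [p])) PySem.Dict.empty).getD val []).foldl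
        (fun res p => PySem.List.pySetD res p.1
          (PySem.List.pySetD (PySem.List.pyGetD res p.1 []) p.2
            (val + (if PySem.Int.mod (p.1 + p.2) 2 == PySem.Int.mod st.2 2 then 0 else 1)))) st.1,
       st.2 + 1)) = pvStep a := by
    funext st val
    rw [pv_getD_eq]
    rfl
  rw [hstep]
  simp only [show (PySem.List.pyGetD a 0 []).length = pvM a from rfl]
  rw [pv_set_eq a (pvM a)]
  rw [show PySem.List.sorted (PySem.Set.ofList (a.flatMap (fun row => row.take (pvM a)))) (fun v => v) false = pvVals a from rfl]
  rw [show PySem.Set.ofList (a.flatMap (fun row => row.take (pvM a))) = pvSet a from rfl]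
  obtain ⟨jl, jr, jc⟩ := pv_outer a (pvVals a) 0
      ((PySem.List.pyRange 0 (a.length : Int) 1).map
        (fun _ => PySem.List.pyRepeat [(0 : Int)] ((pvM a : Nat) : Int)))
      (pv_vals_nodup a) (pv_g0_len a) (fun r hr => pv_g0_row a r hr)
  rw [PySem.List.pyRange_zero_natCast (pvM a)]
  simp only [List.map_map]
  apply congrArg
  apply List.ext_getElem
  · rw [List.length_map, List.length_map, PySem.List.length_enumerate]
    exact jl
  · intro r hr1 hr2
    rw [List.length_map] at hr1
    rw [List.length_map, PySem.List.length_enumerate] at hr2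
    rw [List.getElem_map, List.getElem_map, PySem.List.getElem_enumerate]
    dsimp only
    simp only [zero_add]
    apply congrArg
    have hmrow : pvM a ≤ a[r].length := hpm a[r] (List.getElem_mem hr2)
    have hGr : ((List.foldl (pvStep a)
        ((PySem.List.pyRange 0 (a.length : Int) 1).map
          (fun _ => PySem.List.pyRepeat [(0 : Int)] ((pvM a : Nat) : Int)), 0)
        (pvVals a)).1[r]'hr1).length = pvM a := by
      rw [pv_getElem_eq_getD _ _ hr1]
      exact jr r hr2
    apply List.ext_getElem
    · simp only [List.length_map, hGr, List.length_range]
    · intro c hc1 hc2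
      rw [List.length_map] at hc1
      rw [List.length_map, List.length_range] at hc2
      rw [List.getElem_map, List.getElem_map, List.getElem_range]
      simp only [Function.comp_apply]
      apply congrArg
      have hcm : c < pvM a := hc2
      have hval : PySem.List.pyGetD a[r] (c : Int) 0 = pvVal a ((r : Int), (c : Int)) := by
        rw [pvVal]
        congr 1
        rw [PySem.List.pyGetD_natCast, List.getD_eq_getElem?_getD,
          List.getElem?_eq_getElem hr2]; rfl
      have hmem := pv_mem_vals a r c hr2 hcm hpm
      have hmemS : pvVal a ((r : Int), (c : Int)) ∈ pvSet a := by
        rw [pvVals, PySem.List.mem_sorted] at hmem; exact hmem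
      rw [hval]
      rw [pv_insert_fold_mem (pvSet a) _ _ _ (PySem.Set.nodup_ofList _) hmemS]
      rw [pv_offset_eq_idx a _ hmem]
      rw [pv_cell_eq_getElem _ _ _ hr1 (by rw [hGr]; exact hcm),
        jc r c hr2 hcm, if_pos hmem]
      rw [← pv_bump ((r : Int) + (c : Int)) ((pvVals a).idxOf (pvVal a ((r:Int),(c:Int))) : Int)]
      rw [zero_add]

-- ===== VERDICT (by name: the statement is the Claim_ definition above) =====
theorem solve_spec : Claim_equal_solve := by
  intro a _ hpre
  show solve a = solve_alt a
  exact pv_main a hpre.1 hpre.2
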